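-- pv_equiv track=rewrite | github.com/RayHCai/commitly | worker/app/services/pipeline.py | _strip_deletions
-- ===== SOURCE A (Python) =====
-- _SKIP_EXTENSIONS = {".md", ".markdown", ".txt", ".text", ".rst"}
--
-- def _strip_deletions(diff: str) -> str:
--     """Remove deletion lines and skip markdown/text file sections from a unified diff."""
--     lines = diff.splitlines()
--     result = []
--     skip_file = False
--
--     for line in lines:
--         if line.startswith("diff --git"):
--             # Extract filename from 'diff --git a/path b/path'
--             parts = line.rsplit(" b/", 1)
--             filename = parts[1] if len(parts) == 2 else ""
--             skip_file = any(filename.endswith(ext) for ext in _SKIP_EXTENSIONS)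
--             if skip_file:
--                 continue
--
--         if skip_file:
--             continue
--
--         if not line.startswith("-") or line.startswith("---"):
--             result.append(line)
--
--     return "\n".join(result)
-- ===== SOURCE B (Python) =====
-- _SKIP_EXTENSIONS = {".md", ".markdown", ".txt", ".text", ".rst"}
--
--
-- def _keep(line):
--     return not line.startswith("-") or line.startswith("---")
--
--
-- def _skippable(header):
--     parts = header.rsplit(" b/", 1)
--     filename = parts[1] if len(parts) == 2 else ""
--     return any(filename.endswith(ext) for ext in _SKIP_EXTENSIONS)
--
--
-- def _span_body(lines):
--     """Split lines into (body, rest): body is the run before the next 'diff --git' header."""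
--     i = 0
--     while i < len(lines) and not lines[i].startswith("diff --git"):
--         i += 1
--     return lines[:i], lines[i:]
--
--
-- def _strip_deletions(diff: str) -> str:
--     body, rest = _span_body(diff.splitlines())
--     out = [l for l in body if _keep(l)]
--     while rest:
--         header, tail = rest[0], rest[1:]
--         body, rest = _span_body(tail)
--         if not _skippable(header):
--             out.extend(l for l in [header] + body if _keep(l))
--     return "\n".join(out)
-- ===== Notes on version B (the rewrite author's own statement) =====
-- stated objective: alternative
-- what changed: Replaces A's single stateful pass with a mutable skip_file flag by a section-oriented decomposition: a span helper cuts the line list at the next 'diff --git' header, the prefix is filtered once, and each header-led section is kept or dropped wholesale.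
import Mathlib
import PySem

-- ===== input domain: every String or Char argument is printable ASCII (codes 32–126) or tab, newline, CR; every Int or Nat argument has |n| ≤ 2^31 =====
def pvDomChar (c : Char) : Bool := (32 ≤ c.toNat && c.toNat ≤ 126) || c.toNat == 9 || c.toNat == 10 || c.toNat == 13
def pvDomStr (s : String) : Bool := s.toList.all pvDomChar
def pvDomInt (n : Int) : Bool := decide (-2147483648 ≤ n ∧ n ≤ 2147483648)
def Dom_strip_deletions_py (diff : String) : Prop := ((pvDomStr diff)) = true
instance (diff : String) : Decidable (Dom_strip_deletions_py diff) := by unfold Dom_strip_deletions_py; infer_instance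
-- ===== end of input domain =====

-- B re-decomposes A's stateful single pass into per-section processing (alternative structure, same O(n) cost); return values agree everywhere.

-- shared helpers (the same Python builtin calls appear verbatim in both A and B)
-- 'not line.startswith("-") or line.startswith("---")'
def pvKeep (l : String) : Bool := !(PySem.Str.startswith l "-") || PySem.Str.startswith l "---"
-- 'line.startswith("diff --git")'
def pvIsHeader (l : String) : Bool := PySem.Str.startswith l "diff --git"
-- 'parts = l.rsplit(" b/", 1); parts[1] if len(parts) == 2 else ""' — exact: rsplit with
-- maxsplit 1 on the nonempty separator " b/" splits at its rightmost occurrence (rfind),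
-- giving 2 parts iff the separator occurs; otherwise the fallback "" is taken.
def pvFilename (l : String) : String :=
  let r := PySem.Chars.rfind l.toList " b/".toList
  if r = -1 then "" else String.ofList (l.toList.drop (r.toNat + 3))
-- 'any(filename.endswith(ext) for ext in _SKIP_EXTENSIONS)' — any over the set literal is
-- order-independent, so a fixed list order is exact
def pvSkippable (l : String) : Bool :=
  [".md", ".markdown", ".txt", ".text", ".rst"].any (fun e => PySem.Str.endswith (pvFilename l) e)

-- ===== PORT A =====
-- A's for-loop over lines with state (result, skip_file)
def pvALoop : List String → List String → Bool → List String
  | [], res, _ => res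
  | line :: ls, res, skip =>
    if pvIsHeader line then
      let sk := pvSkippable line
      if sk then pvALoop ls res sk
      else if pvKeep line then pvALoop ls (res ++ [line]) sk else pvALoop ls res sk
    else if skip then pvALoop ls res skip
    else if pvKeep line then pvALoop ls (res ++ [line]) skip else pvALoop ls res skip

def strip_deletions_py (diff : String) : String :=
  PySem.Str.join "\n" (pvALoop (PySem.Str.splitlines diff) [] false)

-- ===== PORT B =====
-- '_span_body': advance i past non-header lines, return (lines[:i], lines[i:])
def pvSpanBody (lines : List String) : List String × List String :=
  (lines.takeWhile (fun l => !pvIsHeader l), lines.dropWhile (fun l => !pvIsHeader l))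

-- B's 'while rest:' loop over header-led sections
def pvBSecs : List String → List String
  | [] => []
  | h :: ls =>
    let p := pvSpanBody ls
    (if pvSkippable h then [] else (h :: p.1).filter pvKeep) ++ pvBSecs p.2
termination_by ls => ls.length
decreasing_by
  simp only [pvSpanBody]
  exact Nat.lt_succ_of_le (List.length_dropWhile_le _ _)

def strip_deletions_py_alt (diff : String) : String :=
  let p := pvSpanBody (PySem.Str.splitlines diff)
  PySem.Str.join "\n" (p.1.filter pvKeep ++ pvBSecs p.2)

-- ===== PRECONDITION & SPEC =====
def Spec_strip_deletions_py (diff : String) (out : String) : Prop := out = strip_deletions_py_alt diff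
instance (diff : String) (out : String) : Decidable (Spec_strip_deletions_py diff out) := by unfold Spec_strip_deletions_py; infer_instance

-- ===== CLAIM (what is proved, stated in full; the proofs are below) =====
def Claim_equal_strip_deletions_py : Prop := ∀ (diff : String), Dom_strip_deletions_py diff → Spec_strip_deletions_py diff (strip_deletions_py diff)

-- ===== LEMMAS AND PROOFS =====

-- A's loop without the accumulator
def pvAGo : List String → Bool → List String
  | [], _ => []
  | line :: ls, skip =>
    if pvIsHeader line then
      (if pvSkippable line then pvAGo ls true
       else (if pvKeep line then [line] else []) ++ pvAGo ls false)
    else if skip then pvAGo ls skip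
    else (if pvKeep line then [line] else []) ++ pvAGo ls skip

theorem pvALoop_eq_aGo (ls : List String) : ∀ (res : List String) (skip : Bool),
    pvALoop ls res skip = res ++ pvAGo ls skip := by
  induction ls with
  | nil => intro res skip; simp [pvALoop, pvAGo]
  | cons l ls ih =>
    intro res skip
    simp only [pvALoop, pvAGo]
    split_ifs with h1 h2 h3 h4 h5 <;> simp [*]

theorem pvAGo_eq_b (ls : List String) :
    (pvAGo ls false = (ls.takeWhile (fun l => !pvIsHeader l)).filter pvKeep
        ++ pvBSecs (ls.dropWhile (fun l => !pvIsHeader l)))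
    ∧ (pvAGo ls true = pvBSecs (ls.dropWhile (fun l => !pvIsHeader l))) := by
  induction ls with
  | nil => simp [pvAGo, pvBSecs]
  | cons l ls ih =>
    by_cases h : pvIsHeader l = true
    · by_cases hs : pvSkippable l = true
      · constructor <;>
          simp [pvAGo, pvBSecs, pvSpanBody, h, hs, List.takeWhile, List.dropWhile, ih.2]
      · constructor <;>
          simp [pvAGo, pvBSecs, pvSpanBody, h, hs, List.takeWhile, List.dropWhile,
            List.filter_cons, ih.1, pvKeep] <;> split_ifs <;> simp
    · constructor <;>
        simp [pvAGo, h, List.takeWhile, List.dropWhile, List.filter_cons, ih.1, ih.2] <;>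
          (split_ifs <;> simp)

-- ===== VERDICT (by name: the statement is the Claim_ definition above) =====
theorem strip_deletions_py_spec : Claim_equal_strip_deletions_py := by
  intro diff _
  unfold Spec_strip_deletions_py strip_deletions_py strip_deletions_py_alt pvSpanBody
  rw [pvALoop_eq_aGo, (pvAGo_eq_b _).1]
  rfl
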